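-- pv_equiv track=rewrite | github.com/kevin1010607/LeetCode | 0517 - Super Washing Machines/solution.py | findMinMoves
-- ===== SOURCE A (Python) =====
-- from typing import List
--
-- def findMinMoves(A: List[int]) -> int:
--     total, n = sum(A), len(A)
--     if total%n:
--         return -1
--     target, move, res = total//n, 0, 0
--     for i in A:
--         move += i-target
--         res = max(res, abs(move), i-target)
--     return res
-- ===== SOURCE B (Python) =====
-- from typing import List
--
--
-- def findMinMoves(A: List[int]) -> int:
--     total, n = sum(A), len(A)
--     if total % n:
--         return -1
--     target = total // n
--
--     def feasible(k):
--         bal = 0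
--         for x in A:
--             if x - target > k:
--                 return False
--             bal += x - target
--             if abs(bal) > k:
--                 return False
--         return True
--
--     lo, hi = 0, sum(abs(x - target) for x in A)
--     while lo < hi:
--         mid = (lo + hi) // 2
--         if feasible(mid):
--             hi = mid
--         else:
--             lo = mid + 1
--     return lo
-- ===== Notes on version B (the rewrite author's own statement) =====
-- stated objective: alternative
-- what changed: Replaces A's single-pass running-max computation by binary search on the answer: a linear boolean feasibility check (no machine surplus > k, no prefix imbalance > k) is bisected between 0 and the sum of absolute deviations, returning the least feasible k.
import Mathlib
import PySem

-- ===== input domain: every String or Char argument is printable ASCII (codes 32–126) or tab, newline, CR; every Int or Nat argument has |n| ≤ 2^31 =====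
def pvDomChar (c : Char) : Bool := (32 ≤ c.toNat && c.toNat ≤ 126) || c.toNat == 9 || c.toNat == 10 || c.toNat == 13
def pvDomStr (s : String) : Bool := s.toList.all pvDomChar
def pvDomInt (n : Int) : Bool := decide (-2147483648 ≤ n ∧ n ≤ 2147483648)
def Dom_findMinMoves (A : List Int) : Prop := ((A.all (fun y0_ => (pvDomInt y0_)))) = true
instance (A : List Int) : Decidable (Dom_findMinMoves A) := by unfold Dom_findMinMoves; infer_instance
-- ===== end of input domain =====

-- B replaces A's single fused max-accumulation pass by binary search on the answer with a linear feasibility check; a genuinely different (parametric-search) algorithm of similar cost.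


-- ===== PORT A =====
-- A's loop: state (move, res); per element move += i - target; res = max(res, |move|, i - target)
def findMinMovesLoop (target move res : Int) : List Int → Int
  | [] => res
  | i :: rest =>
      findMinMovesLoop target (move + (i - target)) (max (max res |move + (i - target)|) (i - target)) rest

def findMinMoves (A : List Int) : Int :=
  let total := A.foldl (· + ·) 0
  let n : Int := A.length
  if PySem.Int.mod total n ≠ 0 then -1
  else
    let target := PySem.Int.floordiv total n
    findMinMovesLoop target 0 0 A

-- ===== PORT B =====
-- feasible(k): one pass — false as soon as a surplus x-target or a |running balance| exceeds k
def feasLoop (target k bal : Int) : List Int → Bool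
  | [] => true
  | x :: rest =>
      if x - target > k then false
      else if |bal + (x - target)| > k then false
      else feasLoop target k (bal + (x - target)) rest

-- sum(abs(x - target) for x in A)
def sumAbsDev (target : Int) (l : List Int) : Int := l.foldl (fun s x => s + |x - target|) 0

-- the while-loop: bisect [lo, hi] to the least k with f k
def bsearch (f : Int → Bool) (lo hi : Int) : Int :=
  if h : lo < hi then
    let mid := PySem.Int.floordiv (lo + hi) 2
    if f mid then bsearch f lo mid else bsearch f (mid + 1) hi
  else lo
termination_by (hi - lo).toNat
decreasing_by
  · have hlt : PySem.Int.floordiv (lo + hi) 2 < hi := by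
      rw [PySem.Int.floordiv_lt_iff_lt_mul (by omega : (0:Int) < 2)]; omega
    omega
  · have hb := PySem.Int.floordiv_two_mid_bounds (le_of_lt h)
    omega

def findMinMoves_alt (A : List Int) : Int :=
  let total := A.foldl (· + ·) 0
  let n : Int := A.length
  if PySem.Int.mod total n ≠ 0 then -1
  else
    let target := PySem.Int.floordiv total n
    bsearch (fun k => feasLoop target k 0 A) 0 (sumAbsDev target A)

-- ===== PRECONDITION & SPEC =====
-- Pre_ excludes exactly the empty list, on which Python A (and B) raises ZeroDivisionError (total % n with n = 0).
def Pre_findMinMoves (A : List Int) : Prop := A ≠ []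
instance (A : List Int) : Decidable (Pre_findMinMoves A) := by unfold Pre_findMinMoves; infer_instance

def pvWitness_findMinMoves : List Int := [1, 0, 5]

def Spec_findMinMoves (A : List Int) (out : Int) : Prop := out = findMinMoves_alt A
instance (A : List Int) (out : Int) : Decidable (Spec_findMinMoves A out) := by unfold Spec_findMinMoves; infer_instance

-- ===== CLAIM (what is proved, stated in full; the proofs are below) =====
def Claim_equal_findMinMoves : Prop := ∀ (A : List Int), Dom_findMinMoves A → Pre_findMinMoves A → Spec_findMinMoves A (findMinMoves A)

-- ===== LEMMAS AND PROOFS =====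

-- the res seed of A's loop only gets maxed in
theorem loop_seed (t : Int) (l : List Int) : ∀ m r : Int, 0 ≤ r →
    findMinMovesLoop t m r l = max r (findMinMovesLoop t m 0 l) := by
  induction l with
  | nil => intro m r hr; simp [findMinMovesLoop]; omega
  | cons x xs ih =>
      intro m r hr
      have ha := abs_nonneg (m + (x - t))
      simp only [findMinMovesLoop]
      rw [ih (m + (x - t)) (max (max r |m + (x - t)|) (x - t)) (by omega),
          ih (m + (x - t)) (max (max 0 |m + (x - t)|) (x - t)) (by omega)]
      omega

-- A's loop result is nonnegative when seeded with res = 0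
theorem loop_nonneg (t : Int) (l : List Int) (m : Int) : 0 ≤ findMinMovesLoop t m 0 l := by
  cases l with
  | nil => simp [findMinMovesLoop]
  | cons x xs =>
      have ha := abs_nonneg (m + (x - t))
      simp only [findMinMovesLoop]
      rw [loop_seed t xs _ _ (by omega)]
      omega

-- feasibility check ⟺ A's loop value is at most k (for 0 ≤ k)
theorem feas_iff (t k : Int) (hk : 0 ≤ k) (l : List Int) : ∀ m : Int,
    (feasLoop t k m l = true ↔ findMinMovesLoop t m 0 l ≤ k) := by
  induction l with
  | nil => intro m; simp [feasLoop, findMinMovesLoop, hk]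
  | cons x xs ih =>
      intro m
      have ha := abs_nonneg (m + (x - t))
      simp only [feasLoop, findMinMovesLoop]
      rw [loop_seed t xs _ _ (by omega)]
      have hnn := loop_nonneg t xs (m + (x - t))
      split_ifs with h1 h2
      · simp only [false_iff]; omega
      · simp only [false_iff]; omega
      · rw [ih (m + (x - t))]; omega

-- shifting the accumulator of sumAbsDev's fold
theorem absdev_shift (t : Int) (l : List Int) : ∀ s : Int,
    l.foldl (fun a x => a + |x - t|) s = s + l.foldl (fun a x => a + |x - t|) 0 := by
  induction l with
  | nil => intro s; simp
  | cons x xs ih =>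
      intro s
      simp only [List.foldl]
      rw [ih (s + |x - t|), ih (0 + |x - t|)]
      omega

-- sumAbsDev is nonnegative
theorem sumAbsDev_nonneg (t : Int) (l : List Int) : 0 ≤ sumAbsDev t l := by
  induction l with
  | nil => simp [sumAbsDev]
  | cons x xs ih =>
      have ha := abs_nonneg (x - t)
      simp only [sumAbsDev, List.foldl] at *
      rw [absdev_shift]
      omega

-- A's loop value is bounded by |m| + sum of absolute deviations
theorem loop_le_sumAbsDev (t : Int) (l : List Int) : ∀ m : Int,
    findMinMovesLoop t m 0 l ≤ |m| + sumAbsDev t l := by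
  induction l with
  | nil => intro m; simp [findMinMovesLoop, sumAbsDev]
  | cons x xs ih =>
      intro m
      have ha := abs_nonneg (m + (x - t))
      have hb := abs_nonneg m
      have hc := abs_nonneg (x - t)
      have htri := abs_add_le m (x - t)
      have hle := le_abs_self (x - t)
      simp only [findMinMovesLoop, sumAbsDev, List.foldl]
      rw [loop_seed t xs _ _ (by omega), absdev_shift]
      have hih := ih (m + (x - t))
      have hnn := loop_nonneg t xs (m + (x - t))
      have hsn := sumAbsDev_nonneg t xs
      simp only [sumAbsDev] at hih hsn
      omega

-- binary search computes the least feasible value M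
theorem bsearch_eq (f : Int → Bool) (M : Int)
    (hf : ∀ k, 0 ≤ k → (f k = true ↔ M ≤ k)) :
    ∀ (n : Nat) (lo hi : Int), (hi - lo).toNat ≤ n → 0 ≤ lo → lo ≤ M → M ≤ hi →
      bsearch f lo hi = M := by
  intro n
  induction n with
  | zero =>
      intro lo hi hn h0 hlM hMh
      rw [bsearch]
      have : ¬ lo < hi := by omega
      rw [dif_neg this]; omega
  | succ n ih =>
      intro lo hi hn h0 hlM hMh
      rw [bsearch]
      by_cases hlt : lo < hi
      · rw [dif_pos hlt]
        have hb := PySem.Int.floordiv_two_mid_bounds (le_of_lt hlt)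
        have hmidlt : PySem.Int.floordiv (lo + hi) 2 < hi := by
          rw [PySem.Int.floordiv_lt_iff_lt_mul (by omega : (0:Int) < 2)]; omega
        set mid := PySem.Int.floordiv (lo + hi) 2 with hmid
        by_cases hfm : f mid = true
        · simp only [hfm, if_true]
          have hM : M ≤ mid := (hf mid (by omega)).mp hfm
          exact ih lo mid (by omega) h0 hlM hM
        · simp only [hfm]
          have hM : ¬ M ≤ mid := fun h => hfm ((hf mid (by omega)).mpr h)
          exact ih (mid + 1) hi (by omega) (by omega) (by omega) hMh
      · rw [dif_neg hlt]; omega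

-- ===== VERDICT (by name: the statement is the Claim_ definition above) =====
theorem findMinMoves_spec : Claim_equal_findMinMoves := by
  intro A _ hpre
  unfold Spec_findMinMoves findMinMoves findMinMoves_alt
  by_cases h : PySem.Int.mod (A.foldl (· + ·) 0) ((A.length : Nat) : Int) ≠ 0
  · rw [if_pos h, if_pos h]
  · rw [if_neg h, if_neg h]
    set t := PySem.Int.floordiv (A.foldl (· + ·) 0) ((A.length : Nat) : Int) with ht
    have h0 : (0:Int) ≤ 0 := le_refl 0
    have habs : |(0:Int)| = 0 := abs_zero
    have hub := loop_le_sumAbsDev t A 0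
    rw [habs, zero_add] at hub
    symm
    exact bsearch_eq (fun k => feasLoop t k 0 A) (findMinMovesLoop t 0 0 A)
      (fun k hk => feas_iff t k hk A 0)
      (sumAbsDev t A - 0).toNat 0 (sumAbsDev t A) (by omega) h0
      (loop_nonneg t A 0) hub
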